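-- pv_equiv track=rewrite | github.com/easyasme/Code_Readability_Project | extracted_codes_python3/code_snippet_467.py | list_to_line
-- ===== SOURCE A (Python) =====
-- def list_to_line(line,type):
--    run = 0
--    tri = 1
--    sct = 1
--    json_dump_path = []
--    json_dump_source = []
--    for string in line:
--       string = str(string)
--       x = string.split(', ')
--       for y in x:
--          run = run + 1
--          if run == sct:
--             sct = sct + 2
--             spp = y.split(': {"hash":')
--             for sop in spp:
--                if run == tri:
--                   tri = tri + 2
--                   z = sop.rstrip('"')
--                   s = z.lstrip(' "')
--                   json_dump_path.append(s)
--                else: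
--                   o = sop.lstrip(' "')
--                   p = o.rstrip('" ')
--                   json_dump_source.append(p)
--    if type == '1':
--       return json_dump_source
--    if type == '2':
--       return json_dump_path
-- ===== SOURCE B (Python) =====
-- def list_to_line(line, type):
--     # Flatten once, then take the 1-indexed-odd tokens by slicing; path gets the
--     # head of each hash-split, source gets the remaining pieces.
--     tokens = [t for s in line for t in str(s).split(', ')]
--     odd = tokens[0::2]
--     if type == '1':
--         return [piece.lstrip(' "').rstrip('" ')
--                 for p in odd for piece in p.split(': {"hash":')[1:]]
--     if type == '2':
--         return [p.split(': {"hash":')[0].rstrip('"').lstrip(' "') for p in odd]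
--     return None
-- ===== Notes on version B (the rewrite author's own statement) =====
-- stated objective: simpler
-- what changed: Replaces the three cross-loop counters (run/tri/sct) and nested conditional loops with one flatten of all tokens, a stride-2 slice for the odd tokens, and a single direct comprehension per requested output (head of each hash-split to path, tail pieces to source).
import Mathlib
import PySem

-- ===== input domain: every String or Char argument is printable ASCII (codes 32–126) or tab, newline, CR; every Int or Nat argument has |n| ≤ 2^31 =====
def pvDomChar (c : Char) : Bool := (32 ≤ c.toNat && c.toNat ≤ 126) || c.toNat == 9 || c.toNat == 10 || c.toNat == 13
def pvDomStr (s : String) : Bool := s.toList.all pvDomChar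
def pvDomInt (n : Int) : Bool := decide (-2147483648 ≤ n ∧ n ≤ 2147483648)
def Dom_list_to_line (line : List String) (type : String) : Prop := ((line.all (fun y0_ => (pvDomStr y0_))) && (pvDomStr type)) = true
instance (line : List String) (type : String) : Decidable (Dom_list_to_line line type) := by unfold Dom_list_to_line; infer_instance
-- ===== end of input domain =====

-- B flattens all tokens once, strides over the odd ones and builds each output list
-- with a direct comprehension, instead of A's three cross-loop counters (objective: simpler).

-- shared helpers: exact ports of the Python string operations both versions use
-- str.lstrip(chars): drop leading characters belonging to the set `chars` (exact)
def pyLstrip (s : String) (chars : List Char) : String :=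
  String.ofList (s.toList.dropWhile (fun c => chars.contains c))

-- str.rstrip(chars): drop trailing characters belonging to the set `chars` (exact)
def pyRstrip (s : String) (chars : List Char) : String :=
  String.ofList ((s.toList.reverse.dropWhile (fun c => chars.contains c)).reverse)

-- str.split(sep) for a nonempty sep (exact: PySem.Chars.splitOn)
def pySplit (s sep : String) : List String :=
  (PySem.Chars.splitOn s.toList sep.toList).map String.ofList

def hashSep : String := ": {\"hash\":"

-- the two cleanup pipelines (same expressions in A and in B)
def stripPath (sop : String) : String := pyLstrip (pyRstrip sop ['"']) [' ', '"']
def stripSrc (sop : String) : String := pyRstrip (pyLstrip sop [' ', '"']) ['"', ' ']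

-- ===== PORT A =====
-- inner `for sop in spp` loop body; state = (tri, json_dump_path, json_dump_source)
def innerStep (run : Int) (st : Int × List String × List String) (sop : String) :
    Int × List String × List String :=
  if run == st.1 then
    (st.1 + 2, st.2.1 ++ [stripPath sop], st.2.2)
  else
    (st.1, st.2.1, st.2.2 ++ [stripSrc sop])

-- `for y in x` loop body; state = (run, tri, sct, json_dump_path, json_dump_source)
def tokStep (st : Int × Int × Int × List String × List String) (y : String) :
    Int × Int × Int × List String × List String :=
  let run := st.1 + 1
  if run == st.2.2.1 then
    let sct := st.2.2.1 + 2
    let inner := (pySplit y hashSep).foldl (innerStep run) (st.2.1, st.2.2.2.1, st.2.2.2.2)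
    (run, inner.1, sct, inner.2.1, inner.2.2)
  else
    (run, st.2.1, st.2.2.1, st.2.2.2.1, st.2.2.2.2)

def list_to_line (line : List String) (type : String) : Option (List String) :=
  let st := line.foldl (fun st s => (pySplit s ", ").foldl tokStep st) (0, 1, 1, [], [])
  if type == "1" then some st.2.2.2.2
  else if type == "2" then some st.2.2.2.1
  else none

-- ===== PORT B =====
-- tokens[0::2], ported by hand: the step-2 slice from index 0 (exact)
mutual
def evens {α : Type} : List α → List α
  | [] => []
  | x :: xs => x :: odds xs
def odds {α : Type} : List α → List α
  | [] => []
  | _ :: xs => evens xs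
end

def list_to_line_alt (line : List String) (type : String) : Option (List String) :=
  let tokens := line.flatMap (fun s => pySplit s ", ")
  let odd := evens tokens
  if type == "1" then
    some (odd.flatMap (fun p => ((pySplit p hashSep).tail).map stripSrc))
  else if type == "2" then
    -- p.split(...)[0]: split never returns an empty list, so headD is exact
    some (odd.map (fun p => stripPath ((pySplit p hashSep).headD "")))
  else none

-- ===== PRECONDITION & SPEC =====
def Spec_list_to_line (line : List String) (type : String) (out : Option (List String)) : Prop := out = list_to_line_alt line type
instance (line : List String) (type : String) (out : Option (List String)) : Decidable (Spec_list_to_line line type out) := by unfold Spec_list_to_line; infer_instance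

-- ===== CLAIM (what is proved, stated in full; the proofs are below) =====
def Claim_equal_list_to_line : Prop := ∀ (line : List String) (type : String), Dom_list_to_line line type → Spec_list_to_line line type (list_to_line line type)

-- ===== LEMMAS AND PROOFS =====

-- split never returns []
theorem splitOn_go_ne_nil (sep : List Char) (fuel : Nat) (l cur : List Char)
    (acc : List (List Char)) : PySem.Chars.splitOn.go sep fuel l cur acc ≠ [] := by
  induction fuel generalizing l cur acc with
  | zero => simp [PySem.Chars.splitOn.go]
  | succ n ih =>
    cases l with
    | nil => simp [PySem.Chars.splitOn.go]
    | cons c rest =>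
      rw [PySem.Chars.splitOn.go]
      split
      · exact ih _ _ _
      · exact ih _ _ _

theorem pySplit_ne_nil (s sep : String) : pySplit s sep ≠ [] := by
  unfold pySplit PySem.Chars.splitOn
  simp only [ne_eq, List.map_eq_nil_iff]
  exact splitOn_go_ne_nil _ _ _ _ _

-- the inner loop once run ≠ tri: every piece goes to source
theorem inner_false (run tri : Int) (h : ¬ run = tri) (rest path src : List String) :
    rest.foldl (innerStep run) (tri, path, src)
      = (tri, path, src ++ rest.map stripSrc) := by
  induction rest generalizing src with
  | nil => simp
  | cons r rs ih =>
    simp only [List.foldl_cons, innerStep, beq_iff_eq, h, if_false]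
    rw [ih]
    simp

-- next odd target after n tokens
def tNext (n : Nat) : Int := if n % 2 = 0 then (n : Int) + 1 else (n : Int) + 2

-- the odd-indexed (1-based) tokens among the next ones, given n already consumed
def sel (n : Nat) (toks : List String) : List String :=
  if n % 2 = 0 then evens toks else odds toks

-- characterisation of A's token loop
theorem foldA (toks : List String) (n : Nat) (path src : List String) :
    toks.foldl tokStep ((n : Int), tNext n, tNext n, path, src)
      = ((n + toks.length : Int), tNext (n + toks.length), tNext (n + toks.length),
         path ++ (sel n toks).map (fun p => stripPath ((pySplit p hashSep).headD "")),
         src ++ (sel n toks).flatMap (fun p => ((pySplit p hashSep).tail).map stripSrc)) := by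
  induction toks generalizing n path src with
  | nil => simp [sel]; split <;> simp [evens, odds]
  | cons x xs ih =>
    simp only [List.foldl_cons]
    rcases Nat.even_or_odd n with he | ho
    · have h0 : n % 2 = 0 := Nat.even_iff.mp he
      have htn : tNext n = (n : Int) + 1 := by simp [tNext, h0]
      have htn1 : tNext (n + 1) = (n : Int) + 3 := by
        have h1 : (n + 1) % 2 = 1 := by omega
        simp [tNext, h1]; ring
      obtain ⟨s0, rest, hsp⟩ := List.exists_cons_of_ne_nil (pySplit_ne_nil x hashSep)
      have hneq : ¬ ((n : Int) + 1 = (n : Int) + 1 + 2) := by omega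
      have hstep : tokStep ((n : Int), tNext n, tNext n, path, src) x
          = ((n : Int) + 1, (n : Int) + 3, (n : Int) + 3,
             path ++ [stripPath s0], src ++ rest.map stripSrc) := by
        simp only [tokStep, htn, beq_self_eq_true, if_true, hsp, List.foldl_cons, innerStep]
        rw [inner_false _ _ hneq,
          show (n : Int) + 1 + 2 = (n : Int) + 3 from by ring]
      rw [hstep,
        show ((n : Int) + 1) = (((n + 1 : Nat)) : Int) by push_cast; ring,
        show ((n : Int) + 3) = tNext (n + 1) from htn1.symm, ih]
      have hsel1 : sel (n + 1) xs = odds xs := by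
        have h1 : (n + 1) % 2 = 1 := by omega
        simp [sel, h1]
      have hsel0 : sel n (x :: xs) = x :: odds xs := by simp [sel, h0, evens]
      simp only [Prod.mk.injEq, hsel0, hsel1, List.map_cons, List.flatMap_cons, hsp,
        List.headD_cons, List.tail_cons, List.length_cons]
      refine ⟨by push_cast; ring, by congr 1; omega, by congr 1; omega,
        by simp, by simp⟩
    · have h1 : n % 2 = 1 := Nat.odd_iff.mp ho
      have hrun : ¬ ((n : Int) + 1 = tNext n) := by simp [tNext, h1]
      have hstep : tokStep ((n : Int), tNext n, tNext n, path, src) x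
          = ((n : Int) + 1, tNext n, tNext n, path, src) := by
        simp only [tokStep, beq_iff_eq, hrun, if_false]
      have h2 : (n + 1) % 2 = 0 := by omega
      have htn1 : tNext n = tNext (n + 1) := by
        simp [tNext, h1, h2]; ring
      rw [hstep,
        show ((n : Int) + 1) = (((n + 1 : Nat)) : Int) by push_cast; ring, htn1, ih]
      have hsel1 : sel (n + 1) xs = evens xs := by simp [sel, h2]
      have hsel0 : sel n (x :: xs) = evens xs := by simp [sel, h1, odds]
      simp [hsel0, hsel1]
      refine ⟨by ring, ?_⟩
      congr 1
      omega

-- A's double loop is the single loop over the flattened token list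
theorem foldl_flatMap' {α β σ : Type} (l : List α) (f : α → List β)
    (g : σ → β → σ) (init : σ) :
    l.foldl (fun st s => (f s).foldl g st) init = (l.flatMap f).foldl g init := by
  induction l generalizing init with
  | nil => rfl
  | cons x xs ih => simp [List.flatMap_cons, List.foldl_append, ih]

-- ===== VERDICT (by name: the statement is the Claim_ definition above) =====
theorem list_to_line_spec : Claim_equal_list_to_line := by
  intro line type _
  unfold Spec_list_to_line list_to_line list_to_line_alt
  rw [foldl_flatMap' line (fun s => pySplit s ", ") tokStep]
  have h0 : ((0 : Int), (1 : Int), (1 : Int), ([] : List String), ([] : List String))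
      = (((0 : Nat) : Int), tNext 0, tNext 0, ([] : List String), ([] : List String)) := by
    simp [tNext]
  rw [h0, foldA]
  simp [sel]
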